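-- pv_equiv track=rewrite | github.com/nabihlme/RESTwrapper | EZID Proxy/wsgibackend/app/components/objects.py | digestANVL
-- ===== SOURCE A (Python) =====
-- def digestANVL(ResponseText):
--     ANVLdict = {}
--     if isinstance(ResponseText, bytes):
--         tempANVL = ResponseText.decode('UTF-8')
--     else:
--         tempANVL = ResponseText
--
--     for element in tempANVL.split("\n"):
--         SplitUp = element.split(": ", 1)
--         if len(SplitUp)>1:
--             ANVLdict[SplitUp[0]] = SplitUp[1]
--
--     return ANVLdict
-- ===== SOURCE B (Python) =====
-- def digestANVL(ResponseText):
--     if isinstance(ResponseText, bytes):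
--         s = ResponseText.decode('UTF-8')
--     else:
--         s = ResponseText
--     # Single character-level state machine: no line splitting, no substring search.
--     # key collects chars of the current line until ':' immediately followed by ' '
--     # is seen (the first ": " of the line); then val collects the rest of the line.
--     d = {}
--     key = []
--     val = None
--     for c in s:
--         if c == '\n':
--             if val is not None:
--                 d[''.join(key)] = ''.join(val)
--             key = []
--             val = None
--         elif val is not None:
--             val.append(c)
--         elif c == ' ' and key and key[-1] == ':':
--             key.pop()
--             val = []
--         else:
--             key.append(c)
--     if val is not None:
--         d[''.join(key)] = ''.join(val)
--     return d
-- ===== Notes on version B (the rewrite author's own statement) =====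
-- stated objective: alternative
-- what changed: B replaces A's split-into-lines pass plus per-line two-piece split at the separator by a single character-level state machine: one fold over the characters accumulates the current key, switches to value mode the first time a colon is immediately followed by a space, and finalizes a dict entry at each newline (and at end of input); no splitting or substring search is performed.
import Mathlib
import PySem

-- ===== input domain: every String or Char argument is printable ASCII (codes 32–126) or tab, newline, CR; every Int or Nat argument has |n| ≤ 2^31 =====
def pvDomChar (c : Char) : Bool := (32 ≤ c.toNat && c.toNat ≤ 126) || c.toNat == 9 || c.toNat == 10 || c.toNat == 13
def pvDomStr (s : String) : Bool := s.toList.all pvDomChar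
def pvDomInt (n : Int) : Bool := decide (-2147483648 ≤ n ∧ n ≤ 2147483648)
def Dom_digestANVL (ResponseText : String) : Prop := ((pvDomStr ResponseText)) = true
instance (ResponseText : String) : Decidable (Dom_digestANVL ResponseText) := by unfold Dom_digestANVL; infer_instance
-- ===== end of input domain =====

-- B replaces A's split-into-lines + per-line split(": ", 1) by a single character-level
-- state machine over the input ('alternative' objective: one fold over the characters,
-- no line list and no substring search).

-- ===== PORT A =====
-- A: for each element of tempANVL.split("\n"), SplitUp = element.split(": ", 1);
--    if len(SplitUp) > 1: ANVLdict[SplitUp[0]] = SplitUp[1].  (str input: the bytes branch is dead.)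
def digestANVL (ResponseText : String) : List (String × String) :=
  let tempANVL := ResponseText
  let d : PySem.Dict String String :=
    (PySem.Chars.splitOn tempANVL.toList ['\n']).foldl
      (fun ANVLdict element =>
        -- 'if len(SplitUp) > 1' guard together with the SplitUp[0] / SplitUp[1] indexing:
        match PySem.Chars.splitOnMax element [':', ' '] 1 with
        | k :: v :: _ => ANVLdict.insert (String.ofList k) (String.ofList v)
        | _ => ANVLdict)
      PySem.Dict.empty
  d.items

-- ===== PORT B =====
-- B's loop body: state = (d, key, val); val = none means "still scanning the key".
-- 'c == " " and key and key[-1] == ":"' is 'key.getLast? = some ':'' (getLast? is none iff key == []).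
def digB_step (st : PySem.Dict String String × List Char × Option (List Char)) (c : Char) :
    PySem.Dict String String × List Char × Option (List Char) :=
  match st with
  | (d, key, val) =>
    if c = '\n' then
      ((match val with
        | some v => d.insert (String.ofList key) (String.ofList v)
        | none => d), [], none)
    else
      match val with
      | some v => (d, key, some (v ++ [c]))
      | none =>
        if c = ' ' ∧ key.getLast? = some ':' then (d, key.dropLast, some [])
        else (d, key ++ [c], none)

-- B's trailing 'if val is not None: d[...] = ...'
def digB_fin (st : PySem.Dict String String × List Char × Option (List Char)) :
    PySem.Dict String String :=
  match st with
  | (d, key, some v) => d.insert (String.ofList key) (String.ofList v)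
  | (d, _, none) => d

def digestANVL_alt (ResponseText : String) : List (String × String) :=
  let s := ResponseText
  (digB_fin (s.toList.foldl digB_step (PySem.Dict.empty, [], none))).items

-- ===== PRECONDITION & SPEC =====
def Spec_digestANVL (ResponseText : String) (out : List (String × String)) : Prop := out = digestANVL_alt ResponseText
instance (ResponseText : String) (out : List (String × String)) : Decidable (Spec_digestANVL ResponseText out) := by unfold Spec_digestANVL; infer_instance

-- ===== CLAIM (what is proved, stated in full; the proofs are below) =====
def Claim_equal_digestANVL : Prop := ∀ (ResponseText : String), Dom_digestANVL ResponseText → Spec_digestANVL ResponseText (digestANVL ResponseText)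

-- ===== LEMMAS AND PROOFS =====

-- reference splitter for split("\n")
def pvSplitNL : List Char → List (List Char)
  | [] => [[]]
  | c :: t => if c = '\n' then [] :: pvSplitNL t else (pvSplitNL t).modifyHead (c :: ·)

-- reference splitter for split(": ", 1)
def pvSplitCS1 : List Char → List (List Char)
  | [] => [[]]
  | c :: t =>
      if [':', ' '].isPrefixOf (c :: t) then [[], t.drop 1]
      else (pvSplitCS1 t).modifyHead (c :: ·)

-- A's per-line body, phrased via the reference splitter
def pvAstep (d : PySem.Dict String String) (l : List Char) : PySem.Dict String String :=
  match pvSplitCS1 l with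
  | k :: v :: _ => d.insert (String.ofList k) (String.ofList v)
  | _ => d

-- "no ': ' occurs in k"
def pvNoCS (k : List Char) : Prop := ¬ [':', ' '] <:+: k

theorem pvSplitNL_ne_nil (l : List Char) : pvSplitNL l ≠ [] := by
  induction l with
  | nil => simp [pvSplitNL]
  | cons c t ih =>
    simp only [pvSplitNL]
    split_ifs
    · simp
    · cases h : pvSplitNL t with
      | nil => exact absurd h ih
      | cons a as => simp [List.modifyHead]

theorem pvSplitCS1_ne_nil (l : List Char) : pvSplitCS1 l ≠ [] := by
  induction l with
  | nil => simp [pvSplitCS1]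
  | cons c t ih =>
    simp only [pvSplitCS1]
    split_ifs
    · simp
    · cases h : pvSplitCS1 t with
      | nil => exact absurd h ih
      | cons a as => simp [List.modifyHead]

theorem pv_splitOn_go (l : List Char) :
    ∀ (fuel : Nat) (cur : List Char) (acc : List (List Char)), l.length ≤ fuel →
      PySem.Chars.splitOn.go ['\n'] fuel l cur acc =
        acc.reverse ++ (pvSplitNL l).modifyHead (cur.reverse ++ ·) := by
  induction l with
  | nil =>
    intro fuel cur acc _
    cases fuel <;> simp [PySem.Chars.splitOn.go, pvSplitNL, List.modifyHead]
  | cons c t ih =>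
    intro fuel cur acc hf
    cases fuel with
    | zero => simp at hf
    | succ fuel =>
      by_cases hc : c = '\n'
      · subst hc
        rw [show PySem.Chars.splitOn.go ['\n'] (fuel+1) ('\n' :: t) cur acc
             = PySem.Chars.splitOn.go ['\n'] fuel (List.drop 1 ('\n' :: t)) [] (cur.reverse :: acc) by
              simp [PySem.Chars.splitOn.go, List.isPrefixOf]]
        rw [List.drop_one, List.tail_cons, ih fuel [] (cur.reverse :: acc) (by simpa using hf)]
        cases h : pvSplitNL t with
        | nil => exact absurd h (pvSplitNL_ne_nil t)
        | cons a as => simp [pvSplitNL, List.modifyHead, h]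
      · rw [show PySem.Chars.splitOn.go ['\n'] (fuel+1) (c :: t) cur acc
             = PySem.Chars.splitOn.go ['\n'] fuel t (c :: cur) acc by
              simp [PySem.Chars.splitOn.go, List.isPrefixOf, Ne.symm hc]]
        rw [ih fuel (c :: cur) acc (by simpa using hf)]
        cases h : pvSplitNL t with
        | nil => exact absurd h (pvSplitNL_ne_nil t)
        | cons a as => simp [pvSplitNL, List.modifyHead, h, hc]

theorem pv_splitOn_eq (l : List Char) :
    PySem.Chars.splitOn l ['\n'] = pvSplitNL l := by
  rw [PySem.Chars.splitOn, pv_splitOn_go l (l.length + 1) [] [] (by omega)]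
  cases h : pvSplitNL l with
  | nil => exact absurd h (pvSplitNL_ne_nil l)
  | cons a as => simp [List.modifyHead]

theorem pv_splitOnMax_go_zero (fuel : Nat) (l cur : List Char) (acc : List (List Char)) :
    PySem.Chars.splitOnMax.go [':', ' '] fuel 0 l cur acc =
      ((cur.reverse ++ l) :: acc).reverse := by
  cases fuel <;> cases l <;> simp [PySem.Chars.splitOnMax.go]

theorem pv_splitOnMax_go_one (l : List Char) :
    ∀ (fuel : Nat) (cur : List Char) (acc : List (List Char)), l.length ≤ fuel →
      PySem.Chars.splitOnMax.go [':', ' '] fuel 1 l cur acc =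
        acc.reverse ++ (pvSplitCS1 l).modifyHead (cur.reverse ++ ·) := by
  induction l with
  | nil =>
    intro fuel cur acc _
    cases fuel <;> simp [PySem.Chars.splitOnMax.go, pvSplitCS1, List.modifyHead]
  | cons c t ih =>
    intro fuel cur acc hf
    cases fuel with
    | zero => simp at hf
    | succ fuel =>
      by_cases hp : [':', ' '].isPrefixOf (c :: t)
      · rw [show PySem.Chars.splitOnMax.go [':', ' '] (fuel+1) 1 (c :: t) cur acc
             = PySem.Chars.splitOnMax.go [':', ' '] fuel 0 (List.drop 2 (c :: t)) [] (cur.reverse :: acc) by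
              simp [PySem.Chars.splitOnMax.go, hp]]
        rw [pv_splitOnMax_go_zero]
        simp [pvSplitCS1, hp, List.modifyHead, List.drop]
      · rw [show PySem.Chars.splitOnMax.go [':', ' '] (fuel+1) 1 (c :: t) cur acc
             = PySem.Chars.splitOnMax.go [':', ' '] fuel 1 t (c :: cur) acc by
              simp [PySem.Chars.splitOnMax.go, hp]]
        rw [ih fuel (c :: cur) acc (by simpa using hf)]
        cases h : pvSplitCS1 t with
        | nil => exact absurd h (pvSplitCS1_ne_nil t)
        | cons a as => simp [pvSplitCS1, List.modifyHead, h, hp]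

theorem pv_splitOnMax_eq (l : List Char) :
    PySem.Chars.splitOnMax l [':', ' '] 1 = pvSplitCS1 l := by
  rw [PySem.Chars.splitOnMax]
  norm_num
  rw [pv_splitOnMax_go_one l (l.length + 1) [] [] (by omega)]
  cases h : pvSplitCS1 l with
  | nil => exact absurd h (pvSplitCS1_ne_nil l)
  | cons a as => simp [List.modifyHead]

-- (1) no ': ' in k → split(": ",1) leaves k whole
theorem pvSplitCS1_of_noCS (k : List Char) (h : pvNoCS k) : pvSplitCS1 k = [k] := by
  induction k with
  | nil => simp [pvSplitCS1]
  | cons c t ih =>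
    have hp : ([':', ' '].isPrefixOf (c :: t)) = false := by
      by_contra hcon
      exact h (List.IsPrefix.isInfix (List.isPrefixOf_iff_prefix.mp (by simpa using hcon)))
    simp [pvSplitCS1, hp, ih (fun hi => h (List.infix_cons hi)), List.modifyHead]

-- pvAstep is the identity on ': '-free lines
theorem pvAstep_of_noCS (d : PySem.Dict String String) (k : List Char) (h : pvNoCS k) :
    pvAstep d k = d := by
  simp [pvAstep, pvSplitCS1_of_noCS k h]

-- (2) appending a non-separator-completing char preserves ': '-freeness
theorem pvNoCS_append (k : List Char) (c : Char) (h : pvNoCS k)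
    (hc : ¬ (c = ' ' ∧ k.getLast? = some ':')) : pvNoCS (k ++ [c]) := by
  rintro ⟨s₁, s₂, hs⟩
  rcases List.eq_nil_or_concat s₂ with h2 | ⟨s₂', c₂, rfl⟩
  · subst h2
    rw [List.append_nil, show s₁ ++ [':', ' '] = (s₁ ++ [':']) ++ [' '] by simp] at hs
    have h' := List.append_inj' hs (by simp)
    obtain ⟨h1, h2⟩ := h'
    exact hc ⟨by simpa using h2.symm, by simp [← h1]⟩
  · rw [List.concat_eq_append,
        show s₁ ++ [':', ' '] ++ (s₂' ++ [c₂]) = (s₁ ++ [':', ' '] ++ s₂') ++ [c₂] by simp] at hs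
    have h' := List.append_inj' hs (by simp)
    exact h ⟨s₁, s₂', by simpa using h'.1⟩

-- (3) the first ': ' of k ++ ': ' ++ t is the shown one when k itself has none ending in it
theorem pvSplitCS1_sep (k t : List Char) (h : pvNoCS (k ++ [':'])) :
    pvSplitCS1 (k ++ ':' :: ' ' :: t) = [k, t] := by
  induction k with
  | nil => simp [pvSplitCS1, List.isPrefixOf]
  | cons a k' ih =>
    have hp : ([':', ' '].isPrefixOf (a :: (k' ++ ':' :: ' ' :: t))) = false := by
      by_contra hcon
      have hpre : [':', ' '] <+: (a :: (k' ++ ':' :: ' ' :: t)) :=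
        List.isPrefixOf_iff_prefix.mp (by simpa using hcon)
      rcases hpre with ⟨r, hr⟩
      -- a = ':' and the next char is ' ', so ': ' is an infix of (a :: k') ++ [':']
      cases k' with
      | nil => simp at hr
      | cons b k'' =>
        simp only [List.cons_append, List.cons.injEq] at hr
        obtain ⟨ha, hb, _⟩ := hr
        exact h ⟨[], k'' ++ [':'], by simp [← ha, ← hb]⟩
    have h' : pvNoCS (k' ++ [':']) := fun hi => h (hi.trans (List.suffix_cons a _).isInfix)
    simp only [List.cons_append, pvSplitCS1, hp, Bool.false_eq_true, if_false, ih h']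
    simp [List.modifyHead]

theorem pv_modifyHead_nil_append (L : List (List Char)) :
    L.modifyHead (fun x => [] ++ x) = L := by
  cases L <;> simp [List.modifyHead]

-- MAIN: joint invariant for B's fold, by strong induction on the length of the remaining input.
-- First conjunct: key-scanning mode with ': '-free partial key k; second: value mode.
theorem pv_main (n : Nat) : ∀ s : List Char, s.length ≤ n →
    (∀ (d : PySem.Dict String String) (k : List Char), pvNoCS k →
      digB_fin (s.foldl digB_step (d, k, none)) =
        ((pvSplitNL s).modifyHead (k ++ ·)).foldl pvAstep d) ∧
    (∀ (d : PySem.Dict String String) (a v : List Char),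
      digB_fin (s.foldl digB_step (d, a, some v)) =
        ((pvSplitNL s).tail).foldl pvAstep
          (d.insert (String.ofList a) (String.ofList (v ++ (pvSplitNL s).head!)))) := by
  induction n with
  | zero =>
    intro s hs
    have : s = [] := List.eq_nil_of_length_eq_zero (by omega)
    subst this
    constructor
    · intro d k hk
      simp [pvSplitNL, List.modifyHead, digB_fin, pvAstep_of_noCS d k hk]
    · intro d a v
      simp [pvSplitNL, digB_fin]
  | succ n ih =>
    intro s hs
    cases s with
    | nil =>
      constructor
      · intro d k hk
        simp [pvSplitNL, List.modifyHead, digB_fin, pvAstep_of_noCS d k hk]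
      · intro d a v
        simp [pvSplitNL, digB_fin]
    | cons c t =>
      have ht : t.length ≤ n := by simpa using hs
      constructor
      · intro d k hk
        by_cases hc : c = '\n'
        · subst hc
          have hstep : digB_step (d, k, none) '\n' = (d, [], none) := by
            simp [digB_step]
          rw [List.foldl_cons, hstep, (ih t ht).1 d [] (by rintro ⟨s₁, s₂, hs'⟩; simp at hs'),
              pv_modifyHead_nil_append]
          cases hnl : pvSplitNL t with
          | nil => exact absurd hnl (pvSplitNL_ne_nil t)
          | cons h0 r =>
            simp [pvSplitNL, hnl, List.modifyHead, pvAstep_of_noCS d k hk]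
        · by_cases hsep : c = ' ' ∧ k.getLast? = some ':'
          · obtain ⟨hc', hlast⟩ := hsep
            subst hc'
            obtain ⟨k', hk'⟩ := List.getLast?_eq_some_iff.mp hlast
            have hdrop : k.dropLast = k' := by simp [hk']
            have hstep : digB_step (d, k, none) ' ' = (d, k.dropLast, some []) := by
              simp [digB_step, hlast]
            rw [List.foldl_cons, hstep, (ih t ht).2 d k.dropLast []]
            cases hnl : pvSplitNL t with
            | nil => exact absurd hnl (pvSplitNL_ne_nil t)
            | cons h0 r =>
              have hA : pvAstep d (k ++ ' ' :: h0)
                  = d.insert (String.ofList k') (String.ofList h0) := by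
                rw [pvAstep, show k ++ ' ' :: h0 = k' ++ ':' :: ' ' :: h0 by simp [hk'],
                    pvSplitCS1_sep k' h0 (hk' ▸ hk)]
              simp [pvSplitNL, hnl, hc, List.modifyHead, hA, hdrop]
          · have hstep : digB_step (d, k, none) c = (d, k ++ [c], none) := by
              simp [digB_step, hc, hsep]
            rw [List.foldl_cons, hstep, (ih t ht).1 d (k ++ [c]) (pvNoCS_append k c hk hsep)]
            cases hnl : pvSplitNL t with
            | nil => exact absurd hnl (pvSplitNL_ne_nil t)
            | cons h0 r =>
              simp [pvSplitNL, hnl, hc, List.modifyHead]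
      · intro d a v
        by_cases hc : c = '\n'
        · subst hc
          have hstep : digB_step (d, a, some v) '\n'
              = (d.insert (String.ofList a) (String.ofList v), [], none) := by
            simp [digB_step]
          rw [List.foldl_cons, hstep,
              (ih t ht).1 _ [] (by rintro ⟨s₁, s₂, hs'⟩; simp at hs'),
              pv_modifyHead_nil_append]
          simp [pvSplitNL, List.head!]
        · have hstep : digB_step (d, a, some v) c = (d, a, some (v ++ [c])) := by
            simp [digB_step, hc]
          rw [List.foldl_cons, hstep, (ih t ht).2 d a (v ++ [c])]
          cases hnl : pvSplitNL t with
          | nil => exact absurd hnl (pvSplitNL_ne_nil t)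
          | cons h0 r =>
            simp [pvSplitNL, hnl, hc, List.modifyHead, List.head!]

-- ===== VERDICT (by name: the statement is the Claim_ definition above) =====
theorem digestANVL_spec : Claim_equal_digestANVL := by
  intro s _
  unfold Spec_digestANVL
  show digestANVL s = digestANVL_alt s
  simp only [digestANVL, digestANVL_alt]
  rw [pv_splitOn_eq]
  have hfun : (fun (ANVLdict : PySem.Dict String String) (element : List Char) =>
      match PySem.Chars.splitOnMax element [':', ' '] 1 with
      | k :: v :: _ => ANVLdict.insert (String.ofList k) (String.ofList v)
      | _ => ANVLdict) = pvAstep := by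
    funext d l
    rw [pv_splitOnMax_eq]
    rfl
  rw [hfun]
  have h := (pv_main s.toList.length s.toList le_rfl).1 PySem.Dict.empty []
    (by rintro ⟨s₁, s₂, hs'⟩; simp at hs')
  rw [h, pv_modifyHead_nil_append]
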